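-- pv_equiv track=rewrite | github.com/niall3rs/constraintSolver | 2Way/2WaySolverTest.py | maximumCardinality
-- ===== SOURCE A (Python) =====
-- def maximumCardinality(queue,constraints):
--
--     newQueue = []
--
--     # Randomly add the first variable
--     newQueue.append(queue.pop(0))
--
--     # Until the queue is empty, count how many constraints each element shares with those in newQueue
--     while len(queue)>0:
--         cardList = []
--         for i in range(len(queue)):
--             cardList.append(0)
--             for const in constraints:
--                 for x in newQueue:
--                     if queue[i] in const and x in const:
--                         cardList[i]+=1
--
--         # Find the index of max cardinality
--         maxIndex = cardList.index(max(cardList))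
--
--         # Move the corresponding variable to newQueue
--         newQueue.append(queue.pop(maxIndex))
--
--     return newQueue
-- ===== SOURCE B (Python) =====
-- def maximumCardinality(queue, constraints):
--     # Incremental algorithm: keep a running shared-constraint score for each
--     # remaining variable and update it only against the newly placed variable,
--     # instead of recounting against the whole placed list every round.
--     csets = [set(c) for c in constraints]
--
--     def shared(a, b):
--         return sum(1 for c in csets if a in c and b in c)
--
--     first = queue.pop(0)
--     new_queue = [first]
--     scores = [shared(v, first) for v in queue]
--     while queue:
--         i = scores.index(max(scores))
--         v = queue.pop(i)
--         scores.pop(i)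
--         new_queue.append(v)
--         scores = [s + shared(u, v) for s, u in zip(scores, queue)]
--     return new_queue
-- ===== Notes on version B (the rewrite author's own statement) =====
-- stated objective: faster
-- what changed: Replaces the per-round triple loop (every remaining variable x every constraint x every placed variable) by incrementally maintained shared-constraint scores, updated only against the newly placed variable, with constraints pre-converted to sets for O(1) membership.
import Mathlib
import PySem

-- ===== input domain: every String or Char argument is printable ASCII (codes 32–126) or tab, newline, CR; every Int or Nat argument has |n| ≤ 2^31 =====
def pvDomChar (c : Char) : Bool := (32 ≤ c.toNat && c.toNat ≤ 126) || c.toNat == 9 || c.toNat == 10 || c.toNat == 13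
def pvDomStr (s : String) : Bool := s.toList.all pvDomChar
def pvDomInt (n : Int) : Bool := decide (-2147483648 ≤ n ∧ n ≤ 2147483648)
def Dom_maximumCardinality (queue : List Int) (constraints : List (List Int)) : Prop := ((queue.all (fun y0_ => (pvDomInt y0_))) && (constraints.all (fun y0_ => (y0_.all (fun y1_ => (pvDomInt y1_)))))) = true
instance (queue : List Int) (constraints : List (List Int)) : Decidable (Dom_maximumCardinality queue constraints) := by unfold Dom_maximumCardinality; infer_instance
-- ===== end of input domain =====

-- B replaces A's per-round triple loop (remaining × constraints × placed) by incrementally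
-- maintained shared-constraint scores updated only against the newly placed variable (faster).
-- Both A and B pop every element off the caller's `queue` list (same side effect); the
-- equivalence proved is about the return value.


-- ===== PORT A =====
-- A's while-loop; fuel = number of remaining iterations (one element is popped per round)
def pvALoop (constraints : List (List Int)) : Nat → List Int → List Int → List Int
  | 0, _, newQueue => newQueue
  | fuel+1, queue, newQueue =>
    if queue.length > 0 then
      -- for i in range(len(queue)): cardList.append(0); the nested loops increment cardList[i]
      let cardList : List Int := (List.range queue.length).foldl (fun cl (i : Nat) =>
        cl ++ [constraints.foldl (fun acc const =>
          newQueue.foldl (fun a x =>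
            if (PySem.List.pyGet? queue (i : Int)).getD 0 ∈ const ∧ x ∈ const then a + 1 else a) acc) 0]) []
      let m := (PySem.List.max? cardList (fun x => x)).getD 0
      let maxIndex := (PySem.List.index? cardList m).getD 0
      match PySem.List.pop? queue (maxIndex : Int) with
      | some (v, rest) => pvALoop constraints fuel rest (newQueue ++ [v])
      | none => newQueue
    else newQueue

def maximumCardinality (queue : List Int) (constraints : List (List Int)) : List Int :=
  match queue with
  | [] => []  -- Python raises IndexError on queue.pop(0); excluded by Pre_
  | q :: rest => pvALoop constraints rest.length rest [q]

-- ===== PORT B =====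
-- number of (pre-set-converted) constraints containing both a and b
def pvShared (csets : List (PySem.Set Int)) (a b : Int) : Int :=
  csets.foldl (fun acc c => if a ∈ c ∧ b ∈ c then acc + 1 else acc) 0

-- B's while-loop: remaining queue, its parallel running scores, and the placed list
def pvBLoop (csets : List (PySem.Set Int)) : Nat → List Int → List Int → List Int → List Int
  | 0, _, _, newQueue => newQueue
  | fuel+1, queue, scores, newQueue =>
    if queue.isEmpty then newQueue
    else
      let m := (PySem.List.max? scores (fun x => x)).getD 0
      let i := (PySem.List.index? scores m).getD 0
      match PySem.List.pop? queue (i : Int), PySem.List.pop? scores (i : Int) with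
      | some (v, qrest), some (_, srest) =>
        pvBLoop csets fuel qrest ((srest.zip qrest).map (fun p => p.1 + pvShared csets p.2 v)) (newQueue ++ [v])
      | _, _ => newQueue

def maximumCardinality_alt (queue : List Int) (constraints : List (List Int)) : List Int :=
  let csets := constraints.map (fun c => PySem.Set.ofList c)
  match queue with
  | [] => []  -- Python raises IndexError on queue.pop(0); excluded by Pre_
  | first :: rest =>
    pvBLoop csets rest.length rest (rest.map (fun v => pvShared csets v first)) [first]

-- ===== PRECONDITION & SPEC =====
-- Python A raises IndexError (pop from empty list) iff queue is empty; B raises there too.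
def Pre_maximumCardinality (queue : List Int) (constraints : List (List Int)) : Prop := queue ≠ []
instance (queue : List Int) (constraints : List (List Int)) : Decidable (Pre_maximumCardinality queue constraints) := by unfold Pre_maximumCardinality; infer_instance

def pvWitness_maximumCardinality : List Int × List (List Int) := ([1, 2, 3], [[1, 2], [2, 3]])

def Spec_maximumCardinality (queue : List Int) (constraints : List (List Int)) (out : List Int) : Prop := out = maximumCardinality_alt queue constraints
instance (queue : List Int) (constraints : List (List Int)) (out : List Int) : Decidable (Spec_maximumCardinality queue constraints out) := by unfold Spec_maximumCardinality; infer_instance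

-- ===== CLAIM (what is proved, stated in full; the proofs are below) =====
def Claim_equal_maximumCardinality : Prop := ∀ (queue : List Int) (constraints : List (List Int)), Dom_maximumCardinality queue constraints → Pre_maximumCardinality queue constraints → Spec_maximumCardinality queue constraints (maximumCardinality queue constraints)

-- ===== LEMMAS AND PROOFS =====

-- the score B maintains for a remaining variable q: total shared constraints with the placed list
def pvScore (csets : List (PySem.Set Int)) (newQueue : List Int) (q : Int) : Int :=
  newQueue.foldl (fun a x => a + pvShared csets q x) 0

-- a counting fold equals acc + the sum of indicators
theorem pvFoldSum {α : Type} (p : α → Prop) [DecidablePred p] :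
    ∀ (l : List α) (acc : Int),
      l.foldl (fun a y => if p y then a + 1 else a) acc
        = acc + (l.map (fun y => if p y then (1:Int) else 0)).sum := by
  intro l
  induction l with
  | nil => intro acc; simp
  | cons h t ih =>
    intro acc
    simp only [List.foldl_cons, List.map_cons, List.sum_cons]
    by_cases hp : p h <;> simp [hp, ih] <;> omega

-- Fubini for double list sums
theorem pvSumComm {α β : Type} (g : α → β → Int) :
    ∀ (l1 : List α) (l2 : List β),
      (l1.map (fun a => (l2.map (g a)).sum)).sum = (l2.map (fun b => (l1.map (fun a => g a b)).sum)).sum := by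
  intro l1
  induction l1 with
  | nil => intro l2; simp
  | cons h t ih =>
    intro l2
    simp only [List.map_cons, List.sum_cons, ih]
    rw [PySem.List.sum_map_add_int]

-- pvShared over the set-converted constraints sums indicators over the raw constraints
theorem pvShared_sum (constraints : List (List Int)) (a b : Int) :
    pvShared (constraints.map (fun c => PySem.Set.ofList c)) a b
      = (constraints.map (fun c => if a ∈ c ∧ b ∈ c then (1:Int) else 0)).sum := by
  unfold pvShared
  rw [List.foldl_map, pvFoldSum (fun c => a ∈ PySem.Set.ofList c ∧ b ∈ PySem.Set.ofList c)]
  simp only [Int.zero_add]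
  congr 1
  apply List.map_congr_left
  intro c _
  simp [PySem.Set.mem_ofList]

-- A's inner double loop for one variable q equals B's score of q against the placed list
theorem pvEntry_eq_score (constraints : List (List Int)) (newQueue : List Int) (q : Int) :
    constraints.foldl (fun acc const =>
        newQueue.foldl (fun a x => if q ∈ const ∧ x ∈ const then a + 1 else a) acc) 0
      = pvScore (constraints.map (fun c => PySem.Set.ofList c)) newQueue q := by
  calc constraints.foldl (fun acc const =>
        newQueue.foldl (fun a x => if q ∈ const ∧ x ∈ const then a + 1 else a) acc) 0
      = constraints.foldl (fun acc const =>
          acc + (newQueue.map (fun x => if q ∈ const ∧ x ∈ const then (1:Int) else 0)).sum) 0 := by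
        apply List.foldl_ext
        intro acc const _
        exact pvFoldSum (fun x => q ∈ const ∧ x ∈ const) newQueue acc
    _ = (constraints.map (fun const => (newQueue.map (fun x => if q ∈ const ∧ x ∈ const then (1:Int) else 0)).sum)).sum := by
        rw [PySem.List.foldl_add]; simp
    _ = (newQueue.map (fun x => (constraints.map (fun const => if q ∈ const ∧ x ∈ const then (1:Int) else 0)).sum)).sum := by
        exact pvSumComm (fun (const : List Int) (x : Int) => if q ∈ const ∧ x ∈ const then (1:Int) else 0) constraints newQueue
    _ = pvScore (constraints.map (fun c => PySem.Set.ofList c)) newQueue q := by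
        unfold pvScore
        rw [PySem.List.foldl_add]
        simp only [Int.zero_add]
        congr 1
        apply List.map_congr_left
        intro x _
        rw [pvShared_sum]

-- A's cardList is exactly queue mapped through B's score function
theorem pvCardList_eq (constraints : List (List Int)) (queue newQueue : List Int) :
    (List.range queue.length).foldl (fun cl (i : Nat) =>
        cl ++ [constraints.foldl (fun acc const =>
          newQueue.foldl (fun a x =>
            if (PySem.List.pyGet? queue (i : Int)).getD 0 ∈ const ∧ x ∈ const then a + 1 else a) acc) 0]) []
      = queue.map (pvScore (constraints.map (fun c => PySem.Set.ofList c)) newQueue) := by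
  rw [PySem.List.foldl_append_singleton_eq_map]
  apply List.ext_getElem (by simp)
  intro k hk1 hk2
  have hk : k < queue.length := by simpa using hk2
  simp only [List.nil_append, List.getElem_map, List.getElem_range]
  have hget : (PySem.List.pyGet? queue (k : Int)).getD 0 = queue[k] := by
    simp [PySem.List.pyGet?_natCast, List.getElem?_eq_getElem hk]
  rw [hget, pvEntry_eq_score]

-- zip of a mapped copy with the original, then combine
theorem pvZipMap (F G : Int → Int) :
    ∀ (l : List Int), ((l.map F).zip l).map (fun p => p.1 + G p.2) = l.map (fun u => F u + G u) := by
  intro l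
  induction l with
  | nil => rfl
  | cons h t ih => simp [ih]

-- score against an extended placed list
theorem pvScore_append (csets : List (PySem.Set Int)) (nq : List Int) (v q : Int) :
    pvScore csets (nq ++ [v]) q = pvScore csets nq q + pvShared csets q v := by
  unfold pvScore
  rw [List.foldl_append]
  simp

-- the main loop invariant: B's scores are A's cardList
theorem pvLoop_eq (constraints : List (List Int)) :
    ∀ (fuel : Nat) (queue newQueue : List Int),
      pvALoop constraints fuel queue newQueue
        = pvBLoop (constraints.map (fun c => PySem.Set.ofList c)) fuel queue
            (queue.map (pvScore (constraints.map (fun c => PySem.Set.ofList c)) newQueue)) newQueue := by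
  intro fuel
  induction fuel with
  | zero => intro queue newQueue; rfl
  | succ f ih =>
    intro queue newQueue
    by_cases hq : queue = []
    · subst hq; simp [pvALoop, pvBLoop]
    · have hlen : 0 < queue.length := List.length_pos_iff.mpr hq
      set csets := constraints.map (fun c => PySem.Set.ofList c) with hcs
      set scores := queue.map (pvScore csets newQueue) with hscores
      rw [pvALoop, pvBLoop]
      have hempty : queue.isEmpty = false := by simpa [List.isEmpty_iff] using hq
      rw [if_pos (by omega), if_neg (by simp [hempty])]
      rw [pvCardList_eq constraints queue newQueue, ← hcs, ← hscores]
      have hs_ne : scores ≠ [] := by simp [hscores, hq]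
      obtain ⟨m, hm⟩ : ∃ m, PySem.List.max? scores (fun x => x) = some m := by
        rcases h : PySem.List.max? scores (fun x => x) with _ | m
        · exact absurd ((PySem.List.max?_eq_none_iff scores (fun x => x)).mp h) hs_ne
        · exact ⟨m, rfl⟩
      have hmem : m ∈ scores := PySem.List.max?_mem hm
      obtain ⟨k, hkidx⟩ : ∃ k, PySem.List.index? scores m = some k := by
        rcases h : PySem.List.index? scores m with _ | k
        · rw [PySem.List.index?_eq_idxOf?] at h
          exact absurd hmem (List.idxOf?_eq_none_iff.mp h)
        · exact ⟨k, rfl⟩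
      obtain ⟨hk, -, -⟩ := PySem.List.getElem_of_index?_eq_some hkidx
      have hkq : k < queue.length := by simpa [hscores] using hk
      simp only [hm, hkidx, Option.getD_some]
      rw [PySem.List.pop?_natCast queue k hkq,
          PySem.List.pop?_natCast scores k hk]
      simp only [hscores, List.getElem_map, List.eraseIdx_map]
      rw [pvZipMap (pvScore csets newQueue) (fun u => pvShared csets u queue[k]) (queue.eraseIdx k)]
      have hmapeq : (queue.eraseIdx k).map (fun u => pvScore csets newQueue u + pvShared csets u queue[k])
          = (queue.eraseIdx k).map (pvScore csets (newQueue ++ [queue[k]])) := by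
        apply List.map_congr_left
        intro u _
        rw [pvScore_append]
      rw [hmapeq]
      exact ih (queue.eraseIdx k) (newQueue ++ [queue[k]])

-- ===== VERDICT (by name: the statement is the Claim_ definition above) =====
theorem maximumCardinality_spec : Claim_equal_maximumCardinality := by
  intro queue constraints _ hpre
  unfold Spec_maximumCardinality
  match queue with
  | [] => exact absurd rfl hpre
  | q :: rest =>
    show pvALoop constraints rest.length rest [q] = maximumCardinality_alt (q :: rest) constraints
    unfold maximumCardinality_alt
    simp only
    rw [pvLoop_eq constraints rest.length rest [q]]
    congr 1
    apply List.map_congr_left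
    intro v _
    unfold pvScore
    simp
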